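-- pv_equiv track=rewrite | github.com/HolyRave/codewars | all_continents.py | all_continents
-- ===== SOURCE A (Python) =====
-- def all_continents(lst):
--     afr, usa, asia, europe, ocean = False,False,False,False,False
--     for dcts in lst:
--         if dcts['continent'] == 'Africa':
--             afr = True
--         elif dcts['continent'] == 'Americas':
--             usa = True
--         elif dcts['continent'] == 'Asia':
--             asia = True
--         elif dcts['continent'] == 'Europe':
--             europe = True
--         elif dcts['continent'] == 'Oceania':
--             ocean = True
--     return afr and usa and asia and europe and ocean
-- ===== SOURCE B (Python) =====
-- def all_continents(lst):
--     continents = [d['continent'] for d in lst]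
--     return all(name in continents for name in ('Africa', 'Americas', 'Asia', 'Europe', 'Oceania'))
-- ===== Notes on version B (the rewrite author's own statement) =====
-- stated objective: idiomatic
-- what changed: Inverts the loop structure: instead of one pass over the list updating five boolean flags via an if/elif chain, B extracts the continent of every entry once and then iterates over the five required names, doing a membership scan for each (all(name in continents ...)).
import Mathlib
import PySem

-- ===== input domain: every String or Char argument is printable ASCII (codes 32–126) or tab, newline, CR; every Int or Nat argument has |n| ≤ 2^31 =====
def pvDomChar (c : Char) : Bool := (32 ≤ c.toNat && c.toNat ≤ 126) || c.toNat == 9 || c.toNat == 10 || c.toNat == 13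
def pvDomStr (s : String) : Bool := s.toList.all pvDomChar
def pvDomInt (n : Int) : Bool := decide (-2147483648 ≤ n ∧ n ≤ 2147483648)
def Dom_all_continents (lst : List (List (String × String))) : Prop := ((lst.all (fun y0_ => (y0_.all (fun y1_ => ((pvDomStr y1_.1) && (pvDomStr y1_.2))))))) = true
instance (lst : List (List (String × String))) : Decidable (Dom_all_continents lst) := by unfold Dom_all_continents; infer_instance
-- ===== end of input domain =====

-- B inverts the loop: A does one pass over lst updating five flags via an if/elif chain; B extracts the continents once and loops over the five required names with a membership scan each (idiomatic, same cost). Pre_ excludes inputs where A raises KeyError.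


-- ===== PORT A =====
-- dcts['continent'] : first-match lookup; under Pre_ the key is present, so getD "" is never taken.
def contOf (d : List (String × String)) : String := (d.lookup "continent").getD ""

def all_continents (lst : List (List (String × String))) : Bool :=
  let st := lst.foldl
    (fun (st : Bool × Bool × Bool × Bool × Bool) dcts =>
      let c := contOf dcts
      if c = "Africa" then (true, st.2.1, st.2.2.1, st.2.2.2.1, st.2.2.2.2)
      else if c = "Americas" then (st.1, true, st.2.2.1, st.2.2.2.1, st.2.2.2.2)
      else if c = "Asia" then (st.1, st.2.1, true, st.2.2.2.1, st.2.2.2.2)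
      else if c = "Europe" then (st.1, st.2.1, st.2.2.1, true, st.2.2.2.2)
      else if c = "Oceania" then (st.1, st.2.1, st.2.2.1, st.2.2.2.1, true)
      else st)
    (false, false, false, false, false)
  st.1 && st.2.1 && st.2.2.1 && st.2.2.2.1 && st.2.2.2.2

-- ===== PORT B =====
-- continents = [d['continent'] for d in lst]; all(name in continents for name in (...))
def all_continents_alt (lst : List (List (String × String))) : Bool :=
  let continents := lst.map contOf
  ["Africa", "Americas", "Asia", "Europe", "Oceania"].all
    (fun name => continents.contains name)

-- ===== PRECONDITION & SPEC =====
-- Pre_ excludes inputs where some dict lacks the key 'continent': there the Python A raises KeyError (and B does too).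
def Pre_all_continents (lst : List (List (String × String))) : Prop :=
  (lst.all (fun d => (d.lookup "continent").isSome)) = true
instance (lst : List (List (String × String))) : Decidable (Pre_all_continents lst) := by unfold Pre_all_continents; infer_instance
def pvWitness_all_continents : (List (List (String × String))) := [[("continent", "Africa")], [("continent", "Asia")]]
def Spec_all_continents (lst : List (List (String × String))) (out : Bool) : Prop := out = all_continents_alt lst
instance (lst : List (List (String × String))) (out : Bool) : Decidable (Spec_all_continents lst out) := by unfold Spec_all_continents; infer_instance

-- ===== CLAIM (what is proved, stated in full; the proofs are below) =====
def Claim_equal_all_continents : Prop := ∀ (lst : List (List (String × String))), Dom_all_continents lst → Pre_all_continents lst → Spec_all_continents lst (all_continents lst)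

-- ===== LEMMAS AND PROOFS =====

-- A's loop: each flag ends up true iff it started true or the continent occurs in the list.
theorem fold_spec (lst : List (List (String × String))) (st : Bool × Bool × Bool × Bool × Bool) :
    lst.foldl
      (fun (st : Bool × Bool × Bool × Bool × Bool) dcts =>
        let c := contOf dcts
        if c = "Africa" then (true, st.2.1, st.2.2.1, st.2.2.2.1, st.2.2.2.2)
        else if c = "Americas" then (st.1, true, st.2.2.1, st.2.2.2.1, st.2.2.2.2)
        else if c = "Asia" then (st.1, st.2.1, true, st.2.2.2.1, st.2.2.2.2)
        else if c = "Europe" then (st.1, st.2.1, st.2.2.1, true, st.2.2.2.2)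
        else if c = "Oceania" then (st.1, st.2.1, st.2.2.1, st.2.2.2.1, true)
        else st)
      st
    = (st.1 || decide ("Africa" ∈ lst.map contOf),
       st.2.1 || decide ("Americas" ∈ lst.map contOf),
       st.2.2.1 || decide ("Asia" ∈ lst.map contOf),
       st.2.2.2.1 || decide ("Europe" ∈ lst.map contOf),
       st.2.2.2.2 || decide ("Oceania" ∈ lst.map contOf)) := by
  induction lst generalizing st with
  | nil => simp
  | cons d tl ih =>
    obtain ⟨a, u, s, e, o⟩ := st
    simp only [List.foldl_cons, List.map_cons, List.mem_cons]
    rw [ih]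
    by_cases h1 : contOf d = "Africa"
    · simp [h1]
    · by_cases h2 : contOf d = "Americas"
      · simp [h2, Ne.symm h1]
      · by_cases h3 : contOf d = "Asia"
        · simp [h3, Ne.symm h1, Ne.symm h2]
        · by_cases h4 : contOf d = "Europe"
          · simp [h4, Ne.symm h1, Ne.symm h2, Ne.symm h3]
          · by_cases h5 : contOf d = "Oceania"
            · simp [h5, Ne.symm h1, Ne.symm h2, Ne.symm h3]
            · simp [h1, h2, h3, h4, h5, Ne.symm h1, Ne.symm h2, Ne.symm h3, Ne.symm h4, Ne.symm h5]

theorem alt_eq (lst : List (List (String × String))) :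
    all_continents_alt lst
    = (decide ("Africa" ∈ lst.map contOf) && decide ("Americas" ∈ lst.map contOf) &&
       decide ("Asia" ∈ lst.map contOf) && decide ("Europe" ∈ lst.map contOf) &&
       decide ("Oceania" ∈ lst.map contOf)) := by
  rw [Bool.eq_iff_iff]
  simp only [all_continents_alt, List.all_cons, List.all_nil,
    List.contains_iff_mem, Bool.and_eq_true, decide_eq_true_eq]
  tauto

-- ===== VERDICT (by name: the statement is the Claim_ definition above) =====
theorem all_continents_spec : Claim_equal_all_continents := by
  intro lst _ _
  show all_continents lst = all_continents_alt lst
  rw [all_continents, fold_spec, alt_eq]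
  simp [Bool.and_assoc]
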